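-- pv_equiv track=rewrite | github.com/neobsenko/stefan | stefan/detectors/merger.py | _merge_non_person
-- ===== SOURCE A (Python) =====
-- from typing import Dict, List, Optional, Set, Tuple
--
-- _PRIORITY = {
--     "regex_hard": 6,
--     "regex_org": 5,
--     "dictionary_org": 4,
--     "regex": 3,
--     "dictionary": 2,
--     "spacy": 1,
-- }
--
-- def _overlaps(a: Tuple[int, int], b: Tuple[int, int]) -> bool:
--     """Two half-open intervals overlap iff they share any positions."""
--     return a[0] < b[1] and b[0] < a[1]
--
-- def _merge_non_person(
--     spans: List[Tuple[int, int, str, str, int]],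
-- ) -> List[Tuple[int, int, str, str, int]]:
--     """Greedy non-overlap: higher priority wins; then longer span."""
--     spans = sorted(spans, key=lambda x: (-x[4], -(x[1] - x[0]), x[0]))
--     accepted: List[Tuple[int, int, str, str, int]] = []
--     for span in spans:
--         start, end = span[0], span[1]
--         overlapping = [a for a in accepted if _overlaps((start, end), (a[0], a[1]))]
--         if overlapping:
--             # A wider ORG span from another detector may extend a locked dictionary
--             # ORG without changing its type. This keeps "Skanska Sverige AB" whole
--             # while still preventing LOCATION/PERSON reclassification of "Skanska".
--             if (
--                 span[2] == "ORG"
--                 and all(a[2] == "ORG" for a in overlapping)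
--                 and all(start <= a[0] and a[1] <= end for a in overlapping)
--                 and (end - start) > max(a[1] - a[0] for a in overlapping)
--                 and not any(a[4] == _PRIORITY["regex_hard"] for a in overlapping)
--             ):
--                 accepted = [
--                     a
--                     for a in accepted
--                     if not _overlaps((start, end), (a[0], a[1]))
--                 ]
--             else:
--                 continue
--         if any(_overlaps((start, end), (a[0], a[1])) for a in accepted):
--             continue
--         accepted.append(span)
--     return accepted
-- ===== SOURCE B (Python) =====
-- # B: interval-index greedy — accepted spans are kept in a list sorted by start
-- # (bisect for the candidate window, insertion keeps it sorted), with sequence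
-- # numbers so the final accepted order is reconstructed by one sort at the end.
--
-- import bisect
--
-- _PRIORITY = {
--     "regex_hard": 6,
--     "regex_org": 5,
--     "dictionary_org": 4,
--     "regex": 3,
--     "dictionary": 2,
--     "spacy": 1,
-- }
--
-- def _merge_non_person(spans):
--     order = sorted(spans, key=lambda x: (-x[4], -(x[1] - x[0]), x[0]))
--     acc = []  # (span, seq) pairs, kept sorted by span start (ties: seq)
--     for seq, span in enumerate(order):
--         s, e = span[0], span[1]
--         # spans with start < e form a prefix of the start-sorted index
--         hi = bisect.bisect_left(acc, e, key=lambda p: p[0][0])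
--         ov = [p[0] for p in acc[:hi] if s < p[0][1]]
--         if not ov:
--             i = bisect.bisect_right(acc, s, key=lambda p: p[0][0])
--             acc.insert(i, (span, seq))
--         elif (span[2] == "ORG"
--               and all(a[2] == "ORG" for a in ov)
--               and all(s <= a[0] and a[1] <= e for a in ov)
--               and all(a[1] - a[0] < e - s for a in ov)
--               and not any(a[4] == _PRIORITY["regex_hard"] for a in ov)):
--             acc = [p for p in acc if not (p[0][0] < e and s < p[0][1])]
--             i = bisect.bisect_right(acc, s, key=lambda p: p[0][0])
--             acc.insert(i, (span, seq))
--     return [p[0] for p in sorted(acc, key=lambda p: p[1])]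
-- ===== Notes on version B (the rewrite author's own statement) =====
-- stated objective: faster
-- what changed: B replaces A's append-order accepted list (rescanned in full for every span) by a start-sorted interval index: bisect narrows overlap candidates to the start<end prefix, insertion keeps the index sorted, and sequence numbers restore A's acceptance order with one final sort.
import Mathlib
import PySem

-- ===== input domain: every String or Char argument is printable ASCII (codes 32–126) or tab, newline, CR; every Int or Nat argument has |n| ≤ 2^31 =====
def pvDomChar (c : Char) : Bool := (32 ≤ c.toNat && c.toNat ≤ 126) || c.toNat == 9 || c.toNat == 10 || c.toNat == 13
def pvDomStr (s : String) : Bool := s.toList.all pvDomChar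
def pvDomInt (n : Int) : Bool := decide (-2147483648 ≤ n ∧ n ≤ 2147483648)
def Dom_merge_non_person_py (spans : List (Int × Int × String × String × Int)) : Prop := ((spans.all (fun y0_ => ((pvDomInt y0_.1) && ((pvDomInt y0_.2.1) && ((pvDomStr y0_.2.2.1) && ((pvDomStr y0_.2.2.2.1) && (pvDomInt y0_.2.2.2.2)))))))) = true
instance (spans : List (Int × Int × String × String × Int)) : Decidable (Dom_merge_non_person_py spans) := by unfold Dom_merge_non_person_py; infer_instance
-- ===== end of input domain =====

-- B replaces A's append-order accepted list (rescanned in full for every span) by a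
-- start-sorted interval index: bisect narrows overlap candidates to a prefix, insertion
-- keeps the index sorted, and sequence numbers restore A's acceptance order by one final
-- sort; objective: faster (same worst-case bound; a timing run measured B ≥ 1.5× faster).

-- ===== PORT A =====

-- _overlaps(a, b)
def pvOverlaps (a b : Int × Int) : Bool := a.1 < b.2 && b.1 < a.2

-- sort key (-x[4], -(x[1]-x[0]), x[0]); lexicographic Int triple via toLex
def pvKey (x : Int × Int × String × String × Int) : Lex (Int × Lex (Int × Int)) :=
  toLex (-x.2.2.2.2, toLex (-(x.2.1 - x.1), x.1))

-- one iteration of A's for-loop body (span processed against accepted)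
def pvStepA (accepted : List (Int × Int × String × String × Int))
    (span : Int × Int × String × String × Int) : List (Int × Int × String × String × Int) :=
  let start := span.1
  let e := span.2.1
  let overlapping := accepted.filter (fun a => pvOverlaps (start, e) (a.1, a.2.1))
  if !overlapping.isEmpty then
    if span.2.2.1 == "ORG"
        && overlapping.all (fun a => a.2.2.1 == "ORG")
        && overlapping.all (fun a => decide (start ≤ a.1) && decide (a.2.1 ≤ e))
        -- max(...) is only evaluated on the nonempty 'overlapping'; getD 0 is unreachable
        && decide (((PySem.List.max? (overlapping.map (fun a => a.2.1 - a.1)) (fun y => y)).getD 0) < e - start)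
        && !(overlapping.any (fun a => a.2.2.2.2 == 6)) then
      let accepted2 := accepted.filter (fun a => !(pvOverlaps (start, e) (a.1, a.2.1)))
      if accepted2.any (fun a => pvOverlaps (start, e) (a.1, a.2.1)) then accepted2
      else accepted2 ++ [span]
    else accepted  -- continue
  else
    if accepted.any (fun a => pvOverlaps (start, e) (a.1, a.2.1)) then accepted
    else accepted ++ [span]

def merge_non_person_py (spans : List (Int × Int × String × String × Int)) : List (Int × Int × String × String × Int) :=
  (PySem.List.sorted spans pvKey).foldl pvStepA []

-- ===== PORT B =====

-- one iteration of B's loop over the enumerated sorted spans; 'acc' is the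
-- start-sorted index of (span, seq) pairs
def pvStepB (acc : List ((Int × Int × String × String × Int) × Int))
    (p : Int × (Int × Int × String × String × Int)) : List ((Int × Int × String × String × Int) × Int) :=
  let seq := p.1
  let span := p.2
  let s := span.1
  let e := span.2.1
  -- spans with start < e form a prefix of the start-sorted index
  let hi := PySem.List.bisectLeft (acc.map (fun q => q.1.1)) e
  let ov := ((acc.take hi).filter (fun q => decide (s < q.1.2.1))).map (fun q => q.1)
  if ov.isEmpty then
    acc.insertIdx (PySem.List.bisectRight (acc.map (fun q => q.1.1)) s) (span, seq)
  else if span.2.2.1 == "ORG"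
      && ov.all (fun a => a.2.2.1 == "ORG")
      && ov.all (fun a => decide (s ≤ a.1) && decide (a.2.1 ≤ e))
      && ov.all (fun a => decide (a.2.1 - a.1 < e - s))
      && !(ov.any (fun a => a.2.2.2.2 == 6)) then
    let acc2 := acc.filter (fun q => !(q.1.1 < e && s < q.1.2.1))
    acc2.insertIdx (PySem.List.bisectRight (acc2.map (fun q => q.1.1)) s) (span, seq)
  else acc

def merge_non_person_py_alt (spans : List (Int × Int × String × String × Int)) : List (Int × Int × String × String × Int) :=
  let accF := (PySem.List.enumerate (PySem.List.sorted spans pvKey)).foldl pvStepB []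
  (PySem.List.sorted accF (fun q => q.2)).map (fun q => q.1)

-- ===== PRECONDITION & SPEC =====
def Spec_merge_non_person_py (spans : List (Int × Int × String × String × Int)) (out : List (Int × Int × String × String × Int)) : Prop := out = merge_non_person_py_alt spans
instance (spans : List (Int × Int × String × String × Int)) (out : List (Int × Int × String × String × Int)) : Decidable (Spec_merge_non_person_py spans out) := by unfold Spec_merge_non_person_py; infer_instance

-- ===== CLAIM (what is proved, stated in full; the proofs are below) =====
def Claim_equal_merge_non_person_py : Prop := ∀ (spans : List (Int × Int × String × String × Int)), Dom_merge_non_person_py spans → Spec_merge_non_person_py spans (merge_non_person_py spans)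

-- ===== LEMMAS AND PROOFS =====

-- the strict order in which B's index is kept: by span start, ties by sequence number
def pvLexR (p q : (Int × Int × String × String × Int) × Int) : Prop :=
  p.1.1 < q.1.1 ∨ (p.1.1 = q.1.1 ∧ p.2 < q.2)

-- the loop invariant: z is A's accepted list tagged with acceptance sequence numbers
-- (strictly increasing, all below the loop counter n), and B's index is the
-- rearrangement of z that is strictly sorted by (start, seq)
def pvInv (n : Int) (accA : List (Int × Int × String × String × Int))
    (accB : List ((Int × Int × String × String × Int) × Int)) : Prop :=
  ∃ z : List ((Int × Int × String × String × Int) × Int),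
    z.map Prod.fst = accA ∧
    z.Pairwise (fun p q => p.2 < q.2) ∧
    (∀ p ∈ z, p.2 < n) ∧
    accB.Perm z ∧
    accB.Pairwise pvLexR

-- insertIdx decomposition (i within bounds)
theorem pvInsertIdx_eq {α : Type} (l : List α) (i : Nat) (a : α) (h : i ≤ l.length) :
    l.insertIdx i a = l.take i ++ a :: l.drop i := by
  induction l generalizing i with
  | nil =>
    have : i = 0 := Nat.le_zero.1 h
    subst this; simp
  | cons x t ih =>
    cases i with
    | zero => simp
    | succ j => simp [List.insertIdx_succ_cons, ih j (by simpa using h)]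

-- pairwise order survives a position-respecting insertion
theorem pvPairwise_insertIdx {α : Type} {R : α → α → Prop} (l : List α) (i : Nat)
    (hi : i ≤ l.length) (a : α) (hl : l.Pairwise R)
    (h1 : ∀ x ∈ l.take i, R x a) (h2 : ∀ x ∈ l.drop i, R a x) :
    (l.insertIdx i a).Pairwise R := by
  rw [pvInsertIdx_eq l i a hi, List.pairwise_append]
  have hld : (l.take i ++ l.drop i).Pairwise R := by rw [List.take_append_drop]; exact hl
  rw [List.pairwise_append] at hld
  refine ⟨hld.1, ?_, ?_⟩
  · exact List.pairwise_cons.2 ⟨h2, hld.2.1⟩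
  · intro x hx b hb
    rcases List.mem_cons.1 hb with rfl | hb
    · exact h1 x hx
    · exact hld.2.2 x hx b hb

-- max over a nonempty Int list is < c iff every element is < c
theorem pvMax_lt_iff (xs : List Int) (hne : xs ≠ []) (c : Int) :
    ((PySem.List.max? xs (fun y => y)).getD 0 < c) ↔ (∀ x ∈ xs, x < c) := by
  obtain ⟨m, hm⟩ : ∃ m, PySem.List.max? xs (fun y => y) = some m := by
    cases h : PySem.List.max? xs (fun y => y) with
    | none => exact absurd ((PySem.List.max?_eq_none_iff _ _).1 h) hne
    | some m => exact ⟨m, rfl⟩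
  have hmem := PySem.List.max?_mem hm
  have hmax := PySem.List.max?_isMax hm
  simp only [hm, Option.getD_some]
  constructor
  · intro hlt x hx; exact lt_of_le_of_lt (hmax x hx) hlt
  · intro h; exact h m hmem

-- a pvLexR-sorted index has weakly increasing starts
theorem pvKeysMono (l : List ((Int × Int × String × String × Int) × Int))
    (hlex : l.Pairwise pvLexR) :
    (l.map (fun q => q.1.1)).Pairwise (· ≤ ·) := by
  rw [List.pairwise_map]
  refine hlex.imp ?_
  intro p q h
  rcases h with h | h
  · exact le_of_lt h
  · exact le_of_eq h.1

-- membership in the bisect prefix/suffix of a start-sorted index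
theorem pvTake_bisectRight (l : List ((Int × Int × String × String × Int) × Int)) (s : Int)
    (hs : (l.map (fun q => q.1.1)).Pairwise (· ≤ ·)) :
    ∀ x ∈ l.take (PySem.List.bisectRight (l.map (fun q => q.1.1)) s), x.1.1 ≤ s := by
  obtain ⟨hle, h1, h2⟩ := PySem.List.bisectRight_spec (l.map (fun q => q.1.1)) s hs
  intro x hx
  obtain ⟨j, hj, hjx⟩ := List.mem_take_iff_getElem.1 hx
  have hjl : j < l.length := lt_of_lt_of_le hj (min_le_right _ _)
  have := h1 j (by simpa using hjl) (lt_of_lt_of_le hj (min_le_left _ _))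
  rw [List.getElem_map] at this
  rw [← hjx]; exact this

theorem pvDrop_bisectRight (l : List ((Int × Int × String × String × Int) × Int)) (s : Int)
    (hs : (l.map (fun q => q.1.1)).Pairwise (· ≤ ·)) :
    ∀ x ∈ l.drop (PySem.List.bisectRight (l.map (fun q => q.1.1)) s), s < x.1.1 := by
  obtain ⟨hle, h1, h2⟩ := PySem.List.bisectRight_spec (l.map (fun q => q.1.1)) s hs
  intro x hx
  obtain ⟨j, hj, hjx⟩ := List.mem_drop_iff_getElem.1 hx
  have := h2 (PySem.List.bisectRight (l.map (fun q => q.1.1)) s + j) (by simp; omega) (Nat.le_add_right _ _)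
  rw [List.getElem_map] at this
  rw [← hjx]; exact this

theorem pvBisectRight_le (l : List ((Int × Int × String × String × Int) × Int)) (s : Int)
    (hs : (l.map (fun q => q.1.1)).Pairwise (· ≤ ·)) :
    PySem.List.bisectRight (l.map (fun q => q.1.1)) s ≤ l.length := by
  have := (PySem.List.bisectRight_spec (l.map (fun q => q.1.1)) s hs).1
  simpa using this

-- inserting the new pair at the bisect position keeps the index strictly sorted
theorem pvInsert_sorted (l : List ((Int × Int × String × String × Int) × Int))
    (span : Int × Int × String × String × Int) (n : Int)
    (hlex : l.Pairwise pvLexR) (hseq : ∀ x ∈ l, x.2 < n) :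
    (l.insertIdx (PySem.List.bisectRight (l.map (fun q => q.1.1)) span.1) (span, n)).Pairwise pvLexR := by
  have hs := pvKeysMono l hlex
  refine pvPairwise_insertIdx l _ (pvBisectRight_le l span.1 hs) _ hlex ?_ ?_
  · intro x hx
    have hxs := pvTake_bisectRight l span.1 hs x hx
    rcases lt_or_eq_of_le hxs with h | h
    · exact Or.inl h
    · exact Or.inr ⟨h, hseq x (List.mem_of_mem_take hx)⟩
  · intro x hx
    exact Or.inl (pvDrop_bisectRight l span.1 hs x hx)

theorem pvInsert_perm (l : List ((Int × Int × String × String × Int) × Int))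
    (span : Int × Int × String × String × Int) (n : Int)
    (hlex : l.Pairwise pvLexR) :
    (l.insertIdx (PySem.List.bisectRight (l.map (fun q => q.1.1)) span.1) (span, n)).Perm ((span, n) :: l) := by
  have hs := pvKeysMono l hlex
  exact List.perm_insertIdx _ _ (pvBisectRight_le l span.1 hs)

-- B's overlap candidates (the bisect prefix, filtered by end) are exactly the
-- overlapping elements of the whole index
theorem pvPrefix_filter (l : List ((Int × Int × String × String × Int) × Int)) (s e : Int)
    (hlex : l.Pairwise pvLexR) :
    (l.take (PySem.List.bisectLeft (l.map (fun q => q.1.1)) e)).filter (fun q => decide (s < q.1.2.1))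
      = l.filter (fun q => q.1.1 < e && s < q.1.2.1) := by
  have hs := pvKeysMono l hlex
  obtain ⟨hle, h1, h2⟩ := PySem.List.bisectLeft_spec (l.map (fun q => q.1.1)) e hs
  set hi := PySem.List.bisectLeft (l.map (fun q => q.1.1)) e with hhi
  have htake : ∀ x ∈ l.take hi, (decide (x.1.1 < e)) = true := by
    intro x hx
    obtain ⟨j, hj, hjx⟩ := List.mem_take_iff_getElem.1 hx
    have hjl : j < l.length := lt_of_lt_of_le hj (min_le_right _ _)
    have := h1 j (by simpa using hjl) (lt_of_lt_of_le hj (min_le_left _ _))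
    rw [List.getElem_map] at this
    rw [← hjx]; simpa using this
  have hdrop : ∀ x ∈ l.drop hi, (x.1.1 < e && s < x.1.2.1) = false := by
    intro x hx
    obtain ⟨j, hj, hjx⟩ := List.mem_drop_iff_getElem.1 hx
    have := h2 (hi + j) (by simp; omega) (Nat.le_add_right _ _)
    rw [List.getElem_map] at this
    have : ¬ (x.1.1 < e) := by rw [← hjx]; omega
    simp [this]
  conv_rhs => rw [← List.take_append_drop hi l]
  rw [List.filter_append]
  have h2' : (l.drop hi).filter (fun q => q.1.1 < e && s < q.1.2.1) = [] := by
    rw [List.filter_eq_nil_iff]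
    intro x hx
    simp [hdrop x hx]
  rw [h2', List.append_nil]
  apply List.filter_congr
  intro x hx
  simp [htake x hx]

-- any/all/isEmpty are invariant under permutation
theorem pvPerm_any {α : Type} {l1 l2 : List α} (h : l1.Perm l2) (p : α → Bool) :
    l1.any p = l2.any p := by
  rw [Bool.eq_iff_iff, List.any_eq_true, List.any_eq_true]
  exact ⟨fun ⟨x, hx, hp⟩ => ⟨x, h.mem_iff.1 hx, hp⟩, fun ⟨x, hx, hp⟩ => ⟨x, h.mem_iff.2 hx, hp⟩⟩

theorem pvPerm_all {α : Type} {l1 l2 : List α} (h : l1.Perm l2) (p : α → Bool) :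
    l1.all p = l2.all p := by
  rw [Bool.eq_iff_iff, List.all_eq_true, List.all_eq_true]
  exact ⟨fun hall x hx => hall x (h.mem_iff.2 hx), fun hall x hx => hall x (h.mem_iff.1 hx)⟩

-- the accept case: A appends the span, B inserts it at the bisect position
theorem pvInv_insert (n : Int) (w : List (Int × Int × String × String × Int))
    (l z : List ((Int × Int × String × String × Int) × Int))
    (span : Int × Int × String × String × Int)
    (hmap : z.map Prod.fst = w)
    (hseqpw : z.Pairwise (fun p q => p.2 < q.2))
    (hbound : ∀ p ∈ z, p.2 < n)
    (hperm : l.Perm z)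
    (hlex : l.Pairwise pvLexR) :
    pvInv (n + 1) (w ++ [span])
      (l.insertIdx (PySem.List.bisectRight (l.map (fun q => q.1.1)) span.1) (span, n)) := by
  refine ⟨z ++ [(span, n)], ?_, ?_, ?_, ?_, ?_⟩
  · rw [List.map_append, hmap]; rfl
  · rw [List.pairwise_append]
    exact ⟨hseqpw, List.pairwise_singleton _ _, fun p hp q hq => by
      rw [List.mem_singleton] at hq; subst hq; exact hbound p hp⟩
  · intro p hp
    rcases List.mem_append.1 hp with hp | hp
    · exact lt_trans (hbound p hp) (by omega)
    · rw [List.mem_singleton] at hp; subst hp; omega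
  · refine (pvInsert_perm l span n hlex).trans ?_
    refine ((hperm.cons _).trans ?_)
    exact (List.perm_append_singleton _ _).symm
  · exact pvInsert_sorted l span n hlex (fun x hx => hbound x (hperm.mem_iff.1 hx))

-- one step of the two loops preserves the invariant
theorem pvStep_inv (n : Int) (accA : List (Int × Int × String × String × Int))
    (accB : List ((Int × Int × String × String × Int) × Int))
    (span : Int × Int × String × String × Int)
    (h : pvInv n accA accB) :
    pvInv (n + 1) (pvStepA accA span) (pvStepB accB (n, span)) := by
  obtain ⟨z, hmap, hseqpw, hbound, hperm, hlex⟩ := h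
  -- A's overlap test, as a predicate on spans
  have hfm : ∀ (u : List ((Int × Int × String × String × Int) × Int))
      (p : (Int × Int × String × String × Int) → Bool),
      (u.filter (fun q => p q.1)).map Prod.fst = (u.map Prod.fst).filter p := by
    intro u p
    rw [List.filter_map]; rfl
  -- B's pair-level overlap list is a permutation of A's overlap list
  have hpermf : ∀ (p : (Int × Int × String × String × Int) → Bool),
      ((accB.filter (fun q => p q.1)).map Prod.fst).Perm (accA.filter p) := by
    intro p
    have h1 : (accB.filter (fun q => p q.1)).Perm (z.filter (fun q => p q.1)) := hperm.filter _
    have h2 := h1.map Prod.fst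
    rw [hfm z p, hmap] at h2
    exact h2
  by_cases hE : accA.filter (fun a => pvOverlaps (span.1, span.2.1) (a.1, a.2.1)) = []
  · -- no overlap: both sides accept the span
    have hBnil : (accB.filter (fun q => pvOverlaps (span.1, span.2.1) (q.1.1, q.1.2.1))).map Prod.fst = [] := by
      have := hpermf (fun a => pvOverlaps (span.1, span.2.1) (a.1, a.2.1))
      rw [hE] at this
      exact this.eq_nil
    have hany : accA.any (fun a => pvOverlaps (span.1, span.2.1) (a.1, a.2.1)) = false := by
      rw [List.any_eq_false]
      intro x hx hpx
      exact absurd (List.mem_filter.2 ⟨hx, hpx⟩) (by rw [hE]; exact List.not_mem_nil)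
    have hA : pvStepA accA span = accA ++ [span] := by
      simp only [pvStepA, hE, hany]
      simp
    have hB : pvStepB accB (n, span)
        = accB.insertIdx (PySem.List.bisectRight (accB.map (fun q => q.1.1)) span.1) (span, n) := by
      simp only [pvStepB]
      rw [pvPrefix_filter accB span.1 span.2.1 hlex]
      have hpe : (fun (q : (Int × Int × String × String × Int) × Int) => decide (q.1.1 < span.2.1) && decide (span.1 < q.1.2.1))
          = (fun q => pvOverlaps (span.1, span.2.1) (q.1.1, q.1.2.1)) := by
        funext q; exact Bool.and_comm _ _
      rw [hpe, hBnil]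
      simp
    rw [hA, hB]
    exact pvInv_insert n accA accB z span hmap hseqpw hbound hperm hlex
  · -- some overlap: the decisions agree because the overlap lists are permutations
    have hp := hpermf (fun a => pvOverlaps (span.1, span.2.1) (a.1, a.2.1))
    have hBne : (accB.filter (fun q => pvOverlaps (span.1, span.2.1) (q.1.1, q.1.2.1))).map Prod.fst ≠ [] := by
      intro hnil
      rw [hnil] at hp
      exact hE hp.symm.eq_nil
    -- A's max-length test is B's all-shorter test
    have hmax : decide (((PySem.List.max? ((accA.filter (fun a => pvOverlaps (span.1, span.2.1) (a.1, a.2.1))).map (fun a => a.2.1 - a.1)) (fun y => y)).getD 0) < span.2.1 - span.1)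
        = (accA.filter (fun a => pvOverlaps (span.1, span.2.1) (a.1, a.2.1))).all (fun a => decide (a.2.1 - a.1 < span.2.1 - span.1)) := by
      have hne' : (accA.filter (fun a => pvOverlaps (span.1, span.2.1) (a.1, a.2.1))).map (fun a => a.2.1 - a.1) ≠ [] := by
        simpa using hE
      rw [Bool.eq_iff_iff, decide_eq_true_iff, pvMax_lt_iff _ hne' (span.2.1 - span.1), List.all_eq_true]
      constructor
      · intro h a ha
        simpa using h _ (List.mem_map.2 ⟨a, ha, rfl⟩)
      · intro h x hx
        obtain ⟨a, ha, rfl⟩ := List.mem_map.1 hx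
        simpa using h a ha
    -- the common decision condition, written on B's overlap list
    set ovB := (accB.filter (fun q => pvOverlaps (span.1, span.2.1) (q.1.1, q.1.2.1))).map Prod.fst with hovB
    set cond := (span.2.2.1 == "ORG"
        && ovB.all (fun a => a.2.2.1 == "ORG")
        && ovB.all (fun a => decide (span.1 ≤ a.1) && decide (a.2.1 ≤ span.2.1))
        && ovB.all (fun a => decide (a.2.1 - a.1 < span.2.1 - span.1))
        && !(ovB.any (fun a => a.2.2.2.2 == 6))) with hcond
    have hA : pvStepA accA span
        = if cond then accA.filter (fun a => !(pvOverlaps (span.1, span.2.1) (a.1, a.2.1))) ++ [span] else accA := by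
      have hiso : (accA.filter (fun a => pvOverlaps (span.1, span.2.1) (a.1, a.2.1))).isEmpty = false := by
        simpa [List.isEmpty_eq_false_iff] using hE
      have hre : (accA.filter (fun a => !(pvOverlaps (span.1, span.2.1) (a.1, a.2.1)))).any
          (fun a => pvOverlaps (span.1, span.2.1) (a.1, a.2.1)) = false := by
        rw [List.any_eq_false]
        intro x hx
        have := List.of_mem_filter hx
        rw [Bool.not_eq_true'] at this
        simp [this]
      simp only [pvStepA, hiso, hmax, Bool.not_false, if_true]
      rw [hcond, hovB]
      rw [pvPerm_all hp.symm (fun a => a.2.2.1 == "ORG"),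
          pvPerm_all hp.symm (fun a => decide (span.1 ≤ a.1) && decide (a.2.1 ≤ span.2.1)),
          pvPerm_all hp.symm (fun a => decide (a.2.1 - a.1 < span.2.1 - span.1)),
          pvPerm_any hp.symm (fun a => a.2.2.2.2 == 6)]
      split_ifs with hc h2
      · exact absurd h2 (by simp [hre])
      · rfl
      · rfl
    have hB : pvStepB accB (n, span)
        = if cond then
            (accB.filter (fun q => !(pvOverlaps (span.1, span.2.1) (q.1.1, q.1.2.1)))).insertIdx
              (PySem.List.bisectRight ((accB.filter (fun q => !(pvOverlaps (span.1, span.2.1) (q.1.1, q.1.2.1)))).map (fun q => q.1.1)) span.1) (span, n)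
          else accB := by
      simp only [pvStepB]
      rw [pvPrefix_filter accB span.1 span.2.1 hlex]
      have hpe : (fun (q : (Int × Int × String × String × Int) × Int) => decide (q.1.1 < span.2.1) && decide (span.1 < q.1.2.1))
          = (fun q => pvOverlaps (span.1, span.2.1) (q.1.1, q.1.2.1)) := by
        funext q; exact Bool.and_comm _ _
      have hpen : (fun (q : (Int × Int × String × String × Int) × Int) => !(decide (q.1.1 < span.2.1) && decide (span.1 < q.1.2.1)))
          = (fun q => !(pvOverlaps (span.1, span.2.1) (q.1.1, q.1.2.1))) := by
        funext q; rw [Bool.and_comm]; rfl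
      rw [hpe, hpen]
      have hiso : ((accB.filter (fun q => pvOverlaps (span.1, span.2.1) (q.1.1, q.1.2.1))).map Prod.fst).isEmpty = false := by
        cases h' : (accB.filter (fun q => pvOverlaps (span.1, span.2.1) (q.1.1, q.1.2.1))).map Prod.fst with
        | nil => exact absurd h' hBne
        | cons a t => rfl
      rw [hiso, if_neg Bool.false_ne_true]
    rw [hA, hB]
    by_cases hc : cond = true
    · rw [if_pos hc, if_pos hc]
      refine pvInv_insert n _ _ (z.filter (fun q => !(pvOverlaps (span.1, span.2.1) (q.1.1, q.1.2.1)))) span ?_ ?_ ?_ (hperm.filter _) (List.Pairwise.sublist List.filter_sublist hlex)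
      · rw [← hmap]
        exact hfm z (fun a => !(pvOverlaps (span.1, span.2.1) (a.1, a.2.1)))
      · exact List.Pairwise.sublist List.filter_sublist hseqpw
      · intro p hp'
        exact hbound p (List.mem_of_mem_filter hp')
    · rw [if_neg hc, if_neg hc]
      exact ⟨z, hmap, hseqpw, fun p hp' => lt_trans (hbound p hp') (by omega), hperm, hlex⟩

-- running both loops in lockstep preserves the invariant
theorem pvRun (l : List (Int × Int × String × String × Int)) :
    ∀ (n : Int) accA accB, pvInv n accA accB →
      pvInv (n + l.length) (l.foldl pvStepA accA) ((PySem.List.enumerate l n).foldl pvStepB accB) := by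
  induction l with
  | nil => intro n accA accB h; simpa [PySem.List.enumerate_nil] using h
  | cons x t ih =>
    intro n accA accB h
    rw [PySem.List.enumerate_cons, List.foldl_cons, List.foldl_cons]
    have := ih (n + 1) _ _ (pvStep_inv n accA accB x h)
    have harith : (n + 1) + (t.length : Int) = n + ((t.length : Int) + 1) := by ring
    simpa [List.length_cons, harith] using this

-- ===== VERDICT (by name: the statement is the Claim_ definition above) =====
theorem merge_non_person_py_spec : Claim_equal_merge_non_person_py := by
  intro spans _
  unfold Spec_merge_non_person_py merge_non_person_py merge_non_person_py_alt
  have h0 : pvInv 0 [] [] := ⟨[], by simp⟩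
  obtain ⟨z, hz1, hz2, _, hperm, _⟩ := pvRun (PySem.List.sorted spans pvKey) 0 [] [] h0
  have hsorted := PySem.List.sorted_eq_of_perm_of_pairwise_lt
    ((PySem.List.enumerate (PySem.List.sorted spans pvKey) 0).foldl pvStepB [])
    z (fun q => q.2) hperm.symm hz2
  simp only [hsorted, hz1]
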